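-- pv_equiv track=rewrite | github.com/wendal/h264_to_mp4 | h264_nalu_reader.py | find_nalu_start
-- ===== SOURCE A (Python) =====
-- def find_nalu_start(buffer, start_pos=0):
--     """
--     在缓冲区中查找NALU起始码(0x000001或0x00000001)
--     返回起始码的起始位置和长度(3或4字节)
--     """
--     pos = start_pos
--     while pos < len(buffer) - 3:
--         # 检查3字节起始码(0x000001)
--         if buffer[pos] == 0 and buffer[pos+1] == 0 and buffer[pos+2] == 1:
--             return pos, 3
--
--         # 检查4字节起始码(0x00000001)
--         if pos < len(buffer) - 4:
--             if buffer[pos] == 0 and buffer[pos+1] == 0 and buffer[pos+2] == 0 and buffer[pos+3] == 1: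
--                 return pos, 4
--
--         pos += 1
--
--     return -1, 0
-- ===== SOURCE B (Python) =====
-- def find_nalu_start(buffer, start_pos=0):
--     """
--     在缓冲区中查找NALU起始码(0x000001或0x00000001)
--     返回起始码的起始位置和长度(3或4字节)
--     """
--     zeros = 0
--     for i in range(max(start_pos, -len(buffer)), len(buffer) - 1):
--         b = buffer[i]
--         if b == 0:
--             zeros += 1
--         elif b == 1 and zeros >= 3:
--             return i - 3, 4
--         elif b == 1 and zeros == 2:
--             return i - 2, 3
--         else:
--             zeros = 0
--     return -1, 0
-- ===== Notes on version B (the rewrite author's own statement) =====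
-- stated objective: faster
-- what changed: Replaced A's per-position re-testing of the 3- and 4-byte windows (up to four indexed reads per position) by a single pass that reads each byte once, maintaining a run-length counter of consecutive zero bytes and classifying the start code when the terminating 0x01 byte is reached; the scan start is clamped to -len(buffer), making B total where A's negative start_pos under -len raises.
import Mathlib
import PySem

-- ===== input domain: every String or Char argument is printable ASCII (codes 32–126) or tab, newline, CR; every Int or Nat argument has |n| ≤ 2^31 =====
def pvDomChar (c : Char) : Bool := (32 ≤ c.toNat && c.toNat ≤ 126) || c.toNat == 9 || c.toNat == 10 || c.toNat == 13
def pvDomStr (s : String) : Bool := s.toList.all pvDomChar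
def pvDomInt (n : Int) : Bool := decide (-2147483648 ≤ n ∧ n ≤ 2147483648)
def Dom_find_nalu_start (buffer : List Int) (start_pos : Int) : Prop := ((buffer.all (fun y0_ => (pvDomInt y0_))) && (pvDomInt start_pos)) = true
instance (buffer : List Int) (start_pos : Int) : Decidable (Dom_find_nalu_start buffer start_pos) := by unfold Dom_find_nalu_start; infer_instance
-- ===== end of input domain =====

-- B replaces A's per-position re-testing of 3/4-byte windows by a single-pass state
-- machine keeping a run-length counter of consecutive zero bytes.
-- Equivalence is about the return value; neither function mutates its arguments.

-- shared indexing helper: buffer[j] with Python's negative-index rule; the .getD 0 only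
-- fills the IndexError case, which Pre_find_nalu_start excludes for A and the clamped
-- scan range makes unreachable for B
def pvGetZ (buffer : List Int) (j : Int) : Int := (PySem.List.pyGet? buffer j).getD 0

-- ===== PORT A =====
-- the while loop of A, step for step: 3-byte window test, then the guarded 4-byte test
def pvLoopA (buffer : List Int) (pos : Int) : List Int :=
  if pos < (buffer.length : Int) - 3 then
    if pvGetZ buffer pos = 0 ∧ pvGetZ buffer (pos+1) = 0 ∧ pvGetZ buffer (pos+2) = 1 then
      [pos, 3]
    else if pos < (buffer.length : Int) - 4 ∧ pvGetZ buffer pos = 0 ∧ pvGetZ buffer (pos+1) = 0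
            ∧ pvGetZ buffer (pos+2) = 0 ∧ pvGetZ buffer (pos+3) = 1 then
      [pos, 4]
    else
      pvLoopA buffer (pos+1)
  else
    [-1, 0]
termination_by ((buffer.length : Int) - 3 - pos).toNat
decreasing_by omega

def find_nalu_start (buffer : List Int) (start_pos : Int) : List Int :=
  pvLoopA buffer start_pos

-- ===== PORT B =====
-- the for loop of B: i over range(max(start_pos, -len(buffer)), len(buffer)-1),
-- zeros = run of 0x00 bytes
def pvLoopB (buffer : List Int) (i zeros : Int) : List Int :=
  if i < (buffer.length : Int) - 1 then
    -- b = buffer[i], inlined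
    if pvGetZ buffer i = 0 then pvLoopB buffer (i+1) (zeros+1)
    else if pvGetZ buffer i = 1 ∧ zeros ≥ 3 then [i - 3, 4]
    else if pvGetZ buffer i = 1 ∧ zeros = 2 then [i - 2, 3]
    else pvLoopB buffer (i+1) 0
  else
    [-1, 0]
termination_by ((buffer.length : Int) - 1 - i).toNat
decreasing_by all_goals omega

def find_nalu_start_alt (buffer : List Int) (start_pos : Int) : List Int :=
  pvLoopB buffer (max start_pos (-(buffer.length : Int))) 0

-- ===== PRECONDITION & SPEC =====
-- Pre_ excludes exactly the inputs on which A raises IndexError: start_pos < -len(buffer)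
-- while the loop runs (start_pos < len(buffer)-3), where A's first read buffer[pos] is
-- out of range. B returns a value on every input.
def Pre_find_nalu_start (buffer : List Int) (start_pos : Int) : Prop :=
  -(buffer.length : Int) ≤ start_pos ∨ (buffer.length : Int) - 3 ≤ start_pos
instance (buffer : List Int) (start_pos : Int) : Decidable (Pre_find_nalu_start buffer start_pos) := by
  unfold Pre_find_nalu_start; infer_instance

def pvWitness_find_nalu_start : List Int × Int := ([0, 0, 0, 1, 7], 0)

def Spec_find_nalu_start (buffer : List Int) (start_pos : Int) (out : List Int) : Prop := out = find_nalu_start_alt buffer start_pos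
instance (buffer : List Int) (start_pos : Int) (out : List Int) : Decidable (Spec_find_nalu_start buffer start_pos out) := by unfold Spec_find_nalu_start; infer_instance

-- ===== CLAIM (what is proved, stated in full; the proofs are below) =====
def Claim_equal_find_nalu_start : Prop := ∀ (buffer : List Int) (start_pos : Int), Dom_find_nalu_start buffer start_pos → Pre_find_nalu_start buffer start_pos → Spec_find_nalu_start buffer start_pos (find_nalu_start buffer start_pos)


-- ===== LEMMAS AND PROOFS =====

-- A's loop skips a position whose two window tests both fail (also true past the end)
lemma pvStepA (buffer : List Int) (pos : Int)
    (h3 : ¬(pvGetZ buffer pos = 0 ∧ pvGetZ buffer (pos+1) = 0 ∧ pvGetZ buffer (pos+2) = 1))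
    (h4 : ¬(pos < (buffer.length : Int) - 4 ∧ pvGetZ buffer pos = 0 ∧ pvGetZ buffer (pos+1) = 0
            ∧ pvGetZ buffer (pos+2) = 0 ∧ pvGetZ buffer (pos+3) = 1)) :
    pvLoopA buffer pos = pvLoopA buffer (pos+1) := by
  rw [pvLoopA]
  by_cases h : pos < (buffer.length : Int) - 3
  · simp only [if_pos h, if_neg h3, if_neg h4]
  · rw [if_neg h, pvLoopA, if_neg (by omega)]

-- past-the-end form of A's loop
lemma pvLoopA_stop (buffer : List Int) (pos : Int) (h : (buffer.length : Int) - 3 ≤ pos) :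
    pvLoopA buffer pos = [-1, 0] := by
  rw [pvLoopA, if_neg (by omega)]

-- when B's scan is exhausted (i ≥ len-1) the zero run cannot reach a window A accepts
lemma pvExitA (buffer : List Int) (i z : Int) (hi : (buffer.length : Int) - 1 ≤ i) (hz : 0 ≤ z)
    (hrun : ∀ j : Int, i - min z 3 ≤ j → j < i → pvGetZ buffer j = 0) :
    pvLoopA buffer (i - min z 3) = [-1, 0] := by
  by_cases hlt : i - min z 3 < (buffer.length : Int) - 3
  · have h1 : min z 3 = 3 := by omega
    have hstep : pvLoopA buffer (i - min z 3) = pvLoopA buffer (i - min z 3 + 1) := by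
      apply pvStepA
      · rintro ⟨-, -, hx⟩
        have h0 := hrun (i - min z 3 + 2) (by omega) (by omega)
        rw [h0] at hx
        exact absurd hx (by norm_num)
      · rintro ⟨hb, -⟩
        omega
    rw [hstep, pvLoopA_stop buffer _ (by omega)]
  · exact pvLoopA_stop buffer _ (by omega)

-- bisimulation: B at index i with a run of `zeros` zero bytes just read corresponds to
-- A waiting at position i - min zeros 3
lemma pvMain (buffer : List Int) : ∀ (n : Nat) (i z : Int),
    ((buffer.length : Int) - 1 - i).toNat ≤ n → 0 ≤ z →
    (∀ j : Int, i - min z 3 ≤ j → j < i → pvGetZ buffer j = 0) →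
    pvLoopB buffer i z = pvLoopA buffer (i - min z 3) := by
  intro n
  induction n with
  | zero =>
    intro i z hn hz hrun
    rw [pvLoopB, if_neg (by omega)]
    exact (pvExitA buffer i z (by omega) hz hrun).symm
  | succ m ih =>
    intro i z hn hz hrun
    by_cases hi : i < (buffer.length : Int) - 1
    · rw [pvLoopB, if_pos hi]
      by_cases hb0 : pvGetZ buffer i = 0
      · rw [if_pos hb0]
        have hrec := ih (i+1) (z+1) (by omega) (by omega) (by
          intro j hj1 hj2
          by_cases hji : j < i
          · exact hrun j (by omega) hji
          · rw [show j = i by omega]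
            exact hb0)
        rw [hrec]
        by_cases hz3 : z ≥ 3
        · -- A steps once: i - 3 → i - 2
          have h2 : min (z+1) 3 = 3 := by omega
          have h1 : min z 3 = 3 := by omega
          rw [h2, h1, show i + 1 - 3 = (i - 3) + 1 by ring]
          have hstep : pvLoopA buffer (i - 3) = pvLoopA buffer (i - 3 + 1) := by
            apply pvStepA
            · rintro ⟨-, -, hx⟩
              have h0 := hrun (i - 3 + 2) (by omega) (by omega)
              rw [h0] at hx
              exact absurd hx (by norm_num)
            · rintro ⟨-, -, -, -, hx⟩
              rw [show i - 3 + 3 = i by ring, hb0] at hx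
              exact absurd hx (by norm_num)
          rw [hstep]
        · -- A stays in place
          rw [show i + 1 - min (z+1) 3 = i - min z 3 by omega]
      · rw [if_neg hb0]
        by_cases hb1 : pvGetZ buffer i = 1
        · by_cases hz3 : z ≥ 3
          · rw [if_pos ⟨hb1, hz3⟩]
            have h1 : min z 3 = 3 := by omega
            rw [h1, pvLoopA, if_pos (by omega)]
            rw [if_neg (by
              rintro ⟨-, -, hx⟩
              have h0 := hrun (i - 3 + 2) (by omega) (by omega)
              rw [h0] at hx
              exact absurd hx (by norm_num))]
            rw [if_pos ⟨by omega,
              hrun (i-3) (by omega) (by omega),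
              hrun (i-3+1) (by omega) (by omega),
              hrun (i-3+2) (by omega) (by omega),
              by rw [show i - 3 + 3 = i by ring]; exact hb1⟩]
          · by_cases hz2 : z = 2
            · rw [if_neg (by rintro ⟨-, h⟩; omega), if_pos ⟨hb1, hz2⟩]
              have h1 : min z 3 = 2 := by omega
              rw [h1, pvLoopA, if_pos (by omega)]
              rw [if_pos ⟨hrun (i-2) (by omega) (by omega),
                hrun (i-2+1) (by omega) (by omega),
                by rw [show i - 2 + 2 = i by ring]; exact hb1⟩]
            · -- z ≤ 1: nothing fires, both scans advance past index i
              rw [if_neg (by rintro ⟨-, h⟩; omega), if_neg (by rintro ⟨-, h⟩; omega)]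
              have hrec := ih (i+1) 0 (by omega) (by omega) (by intro j h1 h2; omega)
              rw [hrec, show i + 1 - min (0:Int) 3 = i + 1 by norm_num]
              have step : ∀ q : Int, i - 1 ≤ q → q ≤ i →
                  pvLoopA buffer q = pvLoopA buffer (q+1) := by
                intro q hq1 hq2
                apply pvStepA
                · rintro ⟨ha, hb, -⟩
                  rcases (by omega : q = i ∨ q + 1 = i) with h | h
                  · rw [h] at ha; exact hb0 ha
                  · rw [h] at hb; exact hb0 hb
                · rintro ⟨-, ha, hb, -, -⟩
                  rcases (by omega : q = i ∨ q + 1 = i) with h | h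
                  · rw [h] at ha; exact hb0 ha
                  · rw [h] at hb; exact hb0 hb
              have hzv : min z 3 = z := by omega
              rw [hzv]
              rcases (by omega : z = 0 ∨ z = 1) with h | h
              · rw [h, sub_zero, step i (by omega) (by omega)]
              · rw [h, step (i-1) (by omega) (by omega),
                  show i - 1 + 1 = i by ring, step i (by omega) (by omega)]
        · -- some other byte: zeros reset; every window containing index i fails
          rw [if_neg (by rintro ⟨h, -⟩; exact hb1 h),
            if_neg (by rintro ⟨h, -⟩; exact hb1 h)]
          have hrec := ih (i+1) 0 (by omega) (by omega) (by intro j h1 h2; omega)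
          rw [hrec, show i + 1 - min (0:Int) 3 = i + 1 by norm_num]
          have step : ∀ q : Int, i - min z 3 ≤ q → q ≤ i →
              pvLoopA buffer q = pvLoopA buffer (q+1) := by
            intro q hq1 hq2
            apply pvStepA
            · rintro ⟨ha, hb, hc⟩
              rcases (by omega : i = q ∨ i = q + 1 ∨ i = q + 2 ∨ i = q + 3) with h | h | h | h
              · exact hb0 (by rw [h]; exact ha)
              · exact hb0 (by rw [h]; exact hb)
              · exact hb1 (by rw [h]; exact hc)
              · have h0 := hrun (q+2) (by omega) (by omega)
                omega
            · rintro ⟨-, ha, hb, hc, hd⟩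
              rcases (by omega : i = q ∨ i = q + 1 ∨ i = q + 2 ∨ i = q + 3) with h | h | h | h
              · exact hb0 (by rw [h]; exact ha)
              · exact hb0 (by rw [h]; exact hb)
              · exact hb0 (by rw [h]; exact hc)
              · exact hb1 (by rw [h]; exact hd)
          rcases (by omega : min z 3 = 0 ∨ min z 3 = 1 ∨ min z 3 = 2 ∨ min z 3 = 3) with h | h | h | h
          · rw [h, sub_zero, step i (by omega) (by omega)]
          · rw [h, step (i-1) (by omega) (by omega), show i - 1 + 1 = i by ring,
              step i (by omega) (by omega)]
          · rw [h, step (i-2) (by omega) (by omega), show i - 2 + 1 = i - 1 by ring,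
              step (i-1) (by omega) (by omega), show i - 1 + 1 = i by ring,
              step i (by omega) (by omega)]
          · rw [h, step (i-3) (by omega) (by omega), show i - 3 + 1 = i - 2 by ring,
              step (i-2) (by omega) (by omega), show i - 2 + 1 = i - 1 by ring,
              step (i-1) (by omega) (by omega), show i - 1 + 1 = i by ring,
              step i (by omega) (by omega)]
    · rw [pvLoopB, if_neg hi]
      exact (pvExitA buffer i z (by omega) hz hrun).symm

-- ===== VERDICT (by name: the statement is the Claim_ definition above) =====
theorem find_nalu_start_spec : Claim_equal_find_nalu_start := by
  intro buffer start_pos _ hpre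
  unfold Spec_find_nalu_start find_nalu_start find_nalu_start_alt
  set s := max start_pos (-(buffer.length : Int)) with hs
  have h := pvMain buffer ((buffer.length : Int) - 1 - s).toNat s 0
    (le_refl _) (le_refl _) (by intro j h1 h2; omega)
  rw [h, show s - min (0:Int) 3 = s by norm_num]
  by_cases hc : -(buffer.length : Int) ≤ start_pos
  · rw [show s = start_pos by omega]
  · -- then Pre gives len-3 ≤ start_pos, so both sides are the stopped loop
    have hlen : (buffer.length : Int) - 3 ≤ start_pos := by
      rcases hpre with h' | h' <;> omega
    rw [pvLoopA_stop buffer start_pos hlen,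
      pvLoopA_stop buffer s (by omega)]
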